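-- pv_equiv track=rewrite | github.com/ljm0850/algo-problem | baekjoon/5212.py | solution
-- ===== SOURCE A (Python) =====
-- def clearArrRow(R,C,arr,asc):
--     range_r = range(R) if asc else range(R-1,-1,-1)
--     flag = True
--     for r in range_r:
--         if flag == False: break
--         for c in range(C):
--             if arr[r][c] == groundSign:
--                 flag = False
--                 break
--         else:
--             for c in range(C):
--                 arr[r][c] = ''
--
-- def clearArrCol(R,C,arr,asc):
--     range_c = range(C) if asc else range(C - 1, -1, -1)
--     flag = True
--     for c in range_c:
--         if flag == False: break
--         for r in range(R):
--             if arr[r][c] == groundSign: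
--                 flag = False
--                 break
--         else:
--             for r in range(R):
--                 arr[r][c] = ''
--
-- def solution(R,C,arr,groundSign,seaSign):
--     ls = list()
--     dr,dc = (1,-1,0,0),(0,0,1,-1)
--     for r in range(R):
--         for c in range(C):
--             if arr[r][c] == seaSign:continue
--             cnt = 0
--             for d in range(4):
--                 nr,nc = r+dr[d],c+dc[d]
--                 if not (0<=nr<R and 0<=nc<C) or arr[nr][nc] == seaSign:
--                     cnt += 1
--             if cnt >= 3: ls.append((r,c))
--     while ls:
--         r,c = ls.pop()
--         arr[r][c] = seaSign
--     clearArrCol(R,C,arr,True)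
--     clearArrCol(R,C,arr,False)
--     clearArrRow(R,C,arr,True)
--     clearArrRow(R,C,arr,False)
--     return arr
--
-- groundSign = 'X'
-- ===== SOURCE B (Python) =====
-- GROUND = 'X'  # land symbol of the puzzle grid
--
--
-- def solution(R, C, arr, groundSign, seaSign):
--     """Turn land cells with at least three sea/out-of-grid neighbours into sea,
--     then blank every cell outside the bounding box of the remaining ground cells."""
--     def is_sea(r, c):
--         return not (0 <= r < R and 0 <= c < C) or arr[r][c] == seaSign
--
--     isolated = [(r, c) for r in range(R) for c in range(C)
--                 if arr[r][c] != seaSign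
--                 and is_sea(r + 1, c) + is_sea(r - 1, c) + is_sea(r, c + 1) + is_sea(r, c - 1) >= 3]
--     for r, c in isolated:
--         arr[r][c] = seaSign
--
--     land = [(r, c) for r in range(R) for c in range(C) if arr[r][c] == GROUND]
--     if land:
--         lo_r = min(r for r, _ in land)
--         hi_r = max(r for r, _ in land)
--         lo_c = min(c for _, c in land)
--         hi_c = max(c for _, c in land)
--     for r in range(R):
--         for c in range(C):
--             if not land or not (lo_r <= r <= hi_r and lo_c <= c <= hi_c):
--                 arr[r][c] = ''
--     return arr
-- ===== Notes on version B (the rewrite author's own statement) =====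
-- stated objective: simpler
-- what changed: B replaces A's four directional clear passes (two column sweeps and two row sweeps, each breaking at the first line containing ground and re-scanning the mutated grid) by computing once the list of remaining ground ('X') cells after the marking phase and blanking, in a single double loop, every in-range cell outside their bounding box (or every cell when no ground remains); Pre_ excludes only inputs where A raises IndexError (C > 0 with fewer than R rows or a row shorter than C). Both A and B mutate arr in place; the proved equivalence is about the return value.
import Mathlib
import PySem

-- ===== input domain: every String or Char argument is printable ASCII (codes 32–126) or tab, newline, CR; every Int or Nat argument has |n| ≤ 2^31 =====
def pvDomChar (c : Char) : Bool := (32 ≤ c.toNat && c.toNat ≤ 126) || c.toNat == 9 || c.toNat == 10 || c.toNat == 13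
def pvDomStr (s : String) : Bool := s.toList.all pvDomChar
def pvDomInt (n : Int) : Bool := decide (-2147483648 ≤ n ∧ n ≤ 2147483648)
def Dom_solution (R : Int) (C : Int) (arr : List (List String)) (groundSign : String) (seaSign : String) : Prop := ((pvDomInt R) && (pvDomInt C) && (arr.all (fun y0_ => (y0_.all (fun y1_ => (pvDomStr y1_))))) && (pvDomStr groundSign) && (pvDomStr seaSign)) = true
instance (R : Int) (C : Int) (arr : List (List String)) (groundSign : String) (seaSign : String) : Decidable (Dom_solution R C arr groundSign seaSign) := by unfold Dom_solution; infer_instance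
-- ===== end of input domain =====

-- B replaces A's four directional clear passes (break-on-first-ground peels) by a single
-- bounding-box pass over the cells equal to the fixed land symbol 'X'; both A and B mutate
-- arr in place in Python, and the equivalence proved here is about the return value.

-- ===== PORT A =====
-- module-level constant:  groundSign = 'X'  (the clear helpers read this global, not the parameter)
def pvGroundSign : String := "X"

-- arr[r][c] read (Python indexing; in-range under Pre_)
def pvGet (arr : List (List String)) (r c : Int) : String :=
  PySem.List.pyGetD (PySem.List.pyGetD arr r []) c ""

-- arr[r][c] = v  (used only with 0 ≤ r, 0 ≤ c in range)
def pvSet (arr : List (List String)) (r c : Int) (v : String) : List (List String) :=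
  arr.set r.toNat ((arr.getD r.toNat []).set c.toNat v)

-- inner 'for c in range(C): arr[r][c] = '''
def pvClearRow (C : Int) (arr : List (List String)) (r : Int) : List (List String) :=
  (PySem.List.pyRange 0 C 1).foldl (fun a c => pvSet a r c "") arr

-- inner 'for r in range(R): arr[r][c] = '''
def pvClearCol (R : Int) (arr : List (List String)) (c : Int) : List (List String) :=
  (PySem.List.pyRange 0 R 1).foldl (fun a r => pvSet a r c "") arr

-- the 'for r in range_r: if not flag: break …' loop of clearArrRow (flag=False modeled by stopping)
def pvRowLoop (R C : Int) (arr : List (List String)) : List Int → List (List String)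
  | [] => arr
  | r :: rest =>
    if (PySem.List.pyRange 0 C 1).any (fun c => pvGet arr r c == pvGroundSign) then arr
    else pvRowLoop R C (pvClearRow C arr r) rest

def pvColLoop (R C : Int) (arr : List (List String)) : List Int → List (List String)
  | [] => arr
  | c :: rest =>
    if (PySem.List.pyRange 0 R 1).any (fun r => pvGet arr r c == pvGroundSign) then arr
    else pvColLoop R C (pvClearCol R arr c) rest

def pvClearArrRow (R C : Int) (arr : List (List String)) (asc : Bool) : List (List String) :=
  pvRowLoop R C arr (if asc then PySem.List.pyRange 0 R 1 else PySem.List.pyRange (R-1) (-1) (-1))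

def pvClearArrCol (R C : Int) (arr : List (List String)) (asc : Bool) : List (List String) :=
  pvColLoop R C arr (if asc then PySem.List.pyRange 0 C 1 else PySem.List.pyRange (C-1) (-1) (-1))

-- the 'for d in range(4)' neighbour count
def pvCnt (R C : Int) (arr : List (List String)) (seaSign : String) (r c : Int) : Int :=
  (PySem.List.pyRange 0 4 1).foldl (fun cnt d =>
    let nr := r + PySem.List.pyGetD [1, -1, 0, 0] d 0
    let nc := c + PySem.List.pyGetD [0, 0, 1, -1] d 0
    if (!decide (0 ≤ nr ∧ nr < R ∧ 0 ≤ nc ∧ nc < C)) || (pvGet arr nr nc == seaSign)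
    then cnt + 1 else cnt) 0

-- the collected list 'ls'
def pvLs (R C : Int) (arr : List (List String)) (seaSign : String) : List (Int × Int) :=
  (PySem.List.pyRange 0 R 1).foldl (fun ls r =>
    (PySem.List.pyRange 0 C 1).foldl (fun ls c =>
      if pvGet arr r c == seaSign then ls
      else if 3 ≤ pvCnt R C arr seaSign r c then ls ++ [(r, c)] else ls) ls) []

def solution (R : Int) (C : Int) (arr : List (List String)) (groundSign : String) (seaSign : String) : List (List String) :=
  -- 'while ls: r,c = ls.pop(); arr[r][c] = seaSign'  (pops from the back), then the four passes
  pvClearArrRow R C (pvClearArrRow R C (pvClearArrCol R C (pvClearArrCol R C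
    ((pvLs R C arr seaSign).reverse.foldl (fun a p => pvSet a p.1 p.2 seaSign) arr) true) false) true) false

-- ===== PORT B =====
-- module constant of Source B:  GROUND = 'X'
def pvGround : String := "X"

def pvB2I (b : Bool) : Int := if b then 1 else 0

-- min/max of a nonempty Python int list (default never used on [])
def pvMin (l : List Int) : Int := match l with | [] => 0 | a :: t => t.foldl min a
def pvMax (l : List Int) : Int := match l with | [] => 0 | a :: t => t.foldl max a

-- def is_sea(r, c)
def pvIsSea (R C : Int) (arr : List (List String)) (seaSign : String) (r c : Int) : Bool :=
  (!decide (0 ≤ r ∧ r < R ∧ 0 ≤ c ∧ c < C)) || (pvGet arr r c == seaSign)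

-- isolated = [(r, c) for r in range(R) for c in range(C) if …]
def pvIsolated (R C : Int) (arr : List (List String)) (seaSign : String) : List (Int × Int) :=
  (PySem.List.pyRange 0 R 1).flatMap (fun r =>
    ((PySem.List.pyRange 0 C 1).filter (fun c =>
      (!(pvGet arr r c == seaSign)) &&
      decide (3 ≤ pvB2I (pvIsSea R C arr seaSign (r+1) c) + pvB2I (pvIsSea R C arr seaSign (r-1) c)
                + pvB2I (pvIsSea R C arr seaSign r (c+1)) + pvB2I (pvIsSea R C arr seaSign r (c-1))))).map
      (fun c => (r, c)))

-- 'for r, c in isolated: arr[r][c] = seaSign'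
def pvMarkB (R C : Int) (arr : List (List String)) (seaSign : String) : List (List String) :=
  (pvIsolated R C arr seaSign).foldl (fun a p => pvSet a p.1 p.2 seaSign) arr

-- land = [(r, c) for r in range(R) for c in range(C) if arr[r][c] == GROUND]
def pvLand (R C : Int) (M : List (List String)) : List (Int × Int) :=
  (PySem.List.pyRange 0 R 1).flatMap (fun r =>
    ((PySem.List.pyRange 0 C 1).filter (fun c => pvGet M r c == pvGround)).map (fun c => (r, c)))

def solution_alt (R : Int) (C : Int) (arr : List (List String)) (groundSign : String) (seaSign : String) : List (List String) :=
  -- final double loop: blank every in-range cell outside the bounding box of 'land'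
  (PySem.List.pyRange 0 R 1).foldl (fun a r =>
    (PySem.List.pyRange 0 C 1).foldl (fun a c =>
      if pvLand R C (pvMarkB R C arr seaSign) = [] ∨
         ¬(pvMin ((pvLand R C (pvMarkB R C arr seaSign)).map Prod.fst) ≤ r ∧
           r ≤ pvMax ((pvLand R C (pvMarkB R C arr seaSign)).map Prod.fst) ∧
           pvMin ((pvLand R C (pvMarkB R C arr seaSign)).map Prod.snd) ≤ c ∧
           c ≤ pvMax ((pvLand R C (pvMarkB R C arr seaSign)).map Prod.snd))
      then pvSet a r c "" else a) a) (pvMarkB R C arr seaSign)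

-- ===== PRECONDITION & SPEC =====
-- Pre_ excludes exactly the inputs where A raises IndexError: C > 0 together with fewer than R
-- rows, or a row among the first R shorter than C (with C ≤ 0 A never indexes arr at all).
def Pre_solution (R : Int) (C : Int) (arr : List (List String)) (groundSign : String) (seaSign : String) : Prop :=
  C ≤ 0 ∨ (R ≤ (arr.length : Int) ∧ ∀ row ∈ arr.take R.toNat, C ≤ (row.length : Int))
instance (R : Int) (C : Int) (arr : List (List String)) (groundSign : String) (seaSign : String) : Decidable (Pre_solution R C arr groundSign seaSign) := by unfold Pre_solution; infer_instance

def pvWitness_solution : Int × Int × List (List String) × String × String :=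
  (2, 2, [["X", "X"], [".", "X"]], "X", ".")

def Spec_solution (R : Int) (C : Int) (arr : List (List String)) (groundSign : String) (seaSign : String) (out : List (List String)) : Prop := out = solution_alt R C arr groundSign seaSign
instance (R : Int) (C : Int) (arr : List (List String)) (groundSign : String) (seaSign : String) (out : List (List String)) : Decidable (Spec_solution R C arr groundSign seaSign out) := by unfold Spec_solution; infer_instance

-- ===== CLAIM (what is proved, stated in full; the proofs are below) =====
def Claim_equal_solution : Prop := ∀ (R : Int) (C : Int) (arr : List (List String)) (groundSign : String) (seaSign : String), Dom_solution R C arr groundSign seaSign → Pre_solution R C arr groundSign seaSign → Spec_solution R C arr groundSign seaSign (solution R C arr groundSign seaSign)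

-- ===== LEMMAS AND PROOFS =====

def pvG (M : List (List String)) (r c : Nat) : String := (M.getD r []).getD c ""
def pvShape (M : List (List String)) : List Nat := M.map List.length

theorem pvGet_cast (M : List (List String)) (r c : Nat) : pvGet M (↑r) (↑c) = pvG M r c := by
  simp [pvGet, pvG, PySem.List.pyGetD_of_nonneg _ _ (by positivity : (0:Int) ≤ ↑r),
        PySem.List.pyGetD_of_nonneg _ _ (by positivity : (0:Int) ≤ ↑c)]

theorem pvShape_length {M N : List (List String)} (h : pvShape M = pvShape N) : M.length = N.length := by
  have := congrArg List.length h; simpa [pvShape] using this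

theorem pvShape_row {M N : List (List String)} (h : pvShape M = pvShape N) (r : Nat) :
    (M.getD r []).length = (N.getD r []).length := by
  have hl := pvShape_length h
  by_cases hr : r < M.length
  · have h1 : (pvShape M)[r]? = (pvShape N)[r]? := by rw [h]
    simp [pvShape, List.getElem?_map] at h1
    rw [List.getD_eq_getElem?_getD, List.getD_eq_getElem?_getD]
    rw [List.getElem?_eq_getElem hr, List.getElem?_eq_getElem (hl ▸ hr)]
    rw [List.getElem?_eq_getElem hr, List.getElem?_eq_getElem (hl ▸ hr)] at h1
    simpa using h1
  · rw [List.getD_eq_getElem?_getD, List.getD_eq_getElem?_getD]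
    rw [List.getElem?_eq_none (by omega), List.getElem?_eq_none (by omega)]

theorem pvShape_set (M : List (List String)) (r c : Int) (v : String) :
    pvShape (pvSet M r c v) = pvShape M := by
  apply List.ext_getElem
  · simp [pvSet, pvShape]
  · intro i h1 h2
    simp only [pvShape, pvSet, List.getElem_map, List.getElem_set]
    split_ifs with hi
    · subst hi
      simp [List.length_set, List.getD_eq_getElem?_getD,
            List.getElem?_eq_getElem (by simpa [pvShape, pvSet] using h2)]
    · rfl

theorem pvG_set (M : List (List String)) (r c : Int) (hr : 0 ≤ r) (hc : 0 ≤ c) (v : String) (r' c' : Nat) :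
    pvG (pvSet M r c v) r' c' =
      if (↑r' = r ∧ ↑c' = c ∧ r' < M.length ∧ c' < (M.getD r' []).length) then v else pvG M r' c' := by
  unfold pvG pvSet
  by_cases h1 : r.toNat = r'
  · subst h1
    by_cases h2 : r.toNat < M.length
    · rw [List.getD_eq_getElem?_getD (l := M.set _ _), List.getElem?_set, if_pos rfl, if_pos h2,
          Option.getD_some]
      by_cases h3 : c.toNat = c'
      · subst h3
        by_cases h4 : c.toNat < (M.getD r.toNat []).length
        · rw [List.getD_eq_getElem?_getD (l := (M.getD r.toNat []).set _ _), List.getElem?_set,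
              if_pos rfl, if_pos h4, Option.getD_some,
              if_pos ⟨by omega, by omega, h2, h4⟩]
        · rw [List.getD_eq_getElem?_getD (l := (M.getD r.toNat []).set _ _), List.getElem?_set,
              if_pos rfl, if_neg h4,
              if_neg (by rintro ⟨-, -, -, hx⟩; omega)]
          rw [List.getD_eq_getElem?_getD (l := M.getD r.toNat []), List.getElem?_eq_none (by omega)]
      · rw [List.getD_eq_getElem?_getD (l := (M.getD r.toNat []).set _ _), List.getElem?_set,
            if_neg h3, if_neg (by rintro ⟨-, hx, -, -⟩; omega), ← List.getD_eq_getElem?_getD]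
    · rw [List.getD_eq_getElem?_getD (l := M.set _ _), List.getElem?_set, if_pos rfl, if_neg h2,
          if_neg (by rintro ⟨-, -, hx, -⟩; omega)]
      rw [List.getD_eq_getElem?_getD (l := M), List.getElem?_eq_none (by omega)]
  · rw [List.getD_eq_getElem?_getD (l := M.set _ _), List.getElem?_set, if_neg h1,
        if_neg (by rintro ⟨hx, -, -, -⟩; omega), ← List.getD_eq_getElem?_getD]

theorem pvShape_foldl_set (v : String) (ps : List (Int × Int)) :
    ∀ (M : List (List String)),
      pvShape (ps.foldl (fun a p => pvSet a p.1 p.2 v) M) = pvShape M := by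
  induction ps with
  | nil => intro M; rfl
  | cons p t ih => intro M; rw [List.foldl_cons, ih, pvShape_set]

theorem pvG_foldl_set (v : String) (ps : List (Int × Int)) :
    ∀ (M : List (List String)) (_ : ∀ p ∈ ps, 0 ≤ p.1 ∧ 0 ≤ p.2) (r c : Nat),
      pvG (ps.foldl (fun a p => pvSet a p.1 p.2 v) M) r c =
        if (((↑r, ↑c) : Int × Int) ∈ ps ∧ r < M.length ∧ c < (M.getD r []).length) then v
        else pvG M r c := by
  induction ps with
  | nil => intro M _ r c; simp
  | cons p t ih =>
    intro M hnn r c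
    rw [List.foldl_cons]
    have hsh := pvShape_set M p.1 p.2 v
    rw [ih _ (fun q hq => hnn q (List.mem_cons.mpr (Or.inr hq)))]
    rw [pvShape_length hsh, pvShape_row hsh]
    rw [pvG_set M p.1 p.2 (hnn p (List.mem_cons_self)).1 (hnn p (List.mem_cons_self)).2 v r c]
    by_cases hb : r < M.length ∧ c < (M.getD r []).length
    · by_cases ht : ((↑r, ↑c) : Int × Int) ∈ t
      · rw [if_pos ⟨ht, hb.1, hb.2⟩, if_pos ⟨List.mem_cons.mpr (Or.inr ht), hb.1, hb.2⟩]
      · rw [if_neg (by tauto)]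
        by_cases hp : ((↑r, ↑c) : Int × Int) = p
        · rw [if_pos ⟨by rw [← hp], by rw [← hp], hb.1, hb.2⟩,
              if_pos ⟨List.mem_cons.mpr (Or.inl hp), hb.1, hb.2⟩]
        · rw [if_neg, if_neg]
          · rintro ⟨hm, -, -⟩
            rcases List.mem_cons.mp hm with h | h
            · exact hp h
            · exact ht h
          · rintro ⟨h1, h2, -, -⟩
            exact hp (Prod.ext h1 h2)
    · rw [if_neg (by tauto), if_neg (by tauto), if_neg (by tauto)]

theorem pvShape_clearCol (R : Int) (M : List (List String)) (c : Int) :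
    pvShape (pvClearCol R M c) = pvShape M := by
  unfold pvClearCol
  rw [← List.foldl_map (f := fun rr => ((rr, c) : Int × Int))
        (g := fun a (p : Int × Int) => pvSet a p.1 p.2 "")]
  exact pvShape_foldl_set _ _ M

theorem pvShape_clearRow (C : Int) (M : List (List String)) (r : Int) :
    pvShape (pvClearRow C M r) = pvShape M := by
  unfold pvClearRow
  rw [← List.foldl_map (f := fun cc => ((r, cc) : Int × Int))
        (g := fun a (p : Int × Int) => pvSet a p.1 p.2 "")]
  exact pvShape_foldl_set _ _ M

theorem pvG_clearCol (R : Int) (M : List (List String)) (c : Int) (hc : 0 ≤ c) (r' c' : Nat) :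
    pvG (pvClearCol R M c) r' c' =
      if ((↑r' : Int) < R ∧ (↑c' : Int) = c ∧ r' < M.length ∧ c' < (M.getD r' []).length)
      then "" else pvG M r' c' := by
  unfold pvClearCol
  rw [← List.foldl_map (f := fun rr => ((rr, c) : Int × Int))
        (g := fun a (p : Int × Int) => pvSet a p.1 p.2 "")]
  rw [pvG_foldl_set _ _ M (by
    intro p hp
    rcases List.mem_map.mp hp with ⟨rr, hrr, rfl⟩
    exact ⟨(PySem.List.mem_pyRange_one.mp hrr).1, hc⟩) r' c']
  apply if_congr _ rfl rfl
  constructor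
  · rintro ⟨hm, h1, h2⟩
    rcases List.mem_map.mp hm with ⟨rr, hrr, heq⟩
    have := PySem.List.mem_pyRange_one.mp hrr
    have h3 : rr = ↑r' ∧ c = ↑c' := by
      constructor <;> [exact congrArg Prod.fst heq; exact congrArg Prod.snd heq]
    exact ⟨by omega, by omega, h1, h2⟩
  · rintro ⟨h1, h2, h3, h4⟩
    exact ⟨List.mem_map.mpr ⟨↑r', PySem.List.mem_pyRange_one.mpr ⟨by positivity, h1⟩, by rw [h2]⟩, h3, h4⟩

theorem pvG_clearRow (C : Int) (M : List (List String)) (r : Int) (hr : 0 ≤ r) (r' c' : Nat) :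
    pvG (pvClearRow C M r) r' c' =
      if ((↑c' : Int) < C ∧ (↑r' : Int) = r ∧ r' < M.length ∧ c' < (M.getD r' []).length)
      then "" else pvG M r' c' := by
  unfold pvClearRow
  rw [← List.foldl_map (f := fun cc => ((r, cc) : Int × Int))
        (g := fun a (p : Int × Int) => pvSet a p.1 p.2 "")]
  rw [pvG_foldl_set _ _ M (by
    intro p hp
    rcases List.mem_map.mp hp with ⟨cc, hcc, rfl⟩
    exact ⟨hr, (PySem.List.mem_pyRange_one.mp hcc).1⟩) r' c']
  apply if_congr _ rfl rfl
  constructor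
  · rintro ⟨hm, h1, h2⟩
    rcases List.mem_map.mp hm with ⟨cc, hcc, heq⟩
    have := PySem.List.mem_pyRange_one.mp hcc
    have h3 : r = ↑r' ∧ cc = ↑c' := by
      constructor <;> [exact congrArg Prod.fst heq; exact congrArg Prod.snd heq]
    exact ⟨by omega, by omega, h1, h2⟩
  · rintro ⟨h1, h2, h3, h4⟩
    exact ⟨List.mem_map.mpr ⟨↑c', PySem.List.mem_pyRange_one.mpr ⟨by positivity, h1⟩, by rw [h2]⟩, h3, h4⟩

theorem pv_any_congr {M N : List (List String)} (R : Int)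
    (h : ∀ r c : Nat, (pvG M r c = "X") ↔ (pvG N r c = "X")) (c : Int) (hc : 0 ≤ c) :
    ((PySem.List.pyRange 0 R 1).any (fun r => pvGet M r c == pvGroundSign)) =
      ((PySem.List.pyRange 0 R 1).any (fun r => pvGet N r c == pvGroundSign)) := by
  apply PySem.List.any_congr_mem
  intro x hx
  have hx0 : 0 ≤ x := (PySem.List.mem_pyRange_one.mp hx).1
  obtain ⟨rn, rfl⟩ : ∃ n : Nat, x = ↑n := ⟨x.toNat, by omega⟩
  obtain ⟨cn, rfl⟩ : ∃ n : Nat, c = ↑n := ⟨c.toNat, by omega⟩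
  rw [pvGet_cast, pvGet_cast, Bool.eq_iff_iff]
  simp only [pvGroundSign, beq_iff_eq]
  exact h rn cn

theorem pvX_clearCol (R : Int) (M : List (List String)) (c : Int) (hc : 0 ≤ c)
    (hna : (PySem.List.pyRange 0 R 1).any (fun r => pvGet M r c == pvGroundSign) = false) :
    ∀ r' c' : Nat, (pvG (pvClearCol R M c) r' c' = "X") ↔ (pvG M r' c' = "X") := by
  intro r' c'
  rw [pvG_clearCol R M c hc r' c']
  split_ifs with hcond
  · constructor
    · intro hx; exact absurd hx (by decide)
    · intro hx
      have hmem : (↑r' : Int) ∈ PySem.List.pyRange 0 R 1 :=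
        PySem.List.mem_pyRange_one.mpr ⟨by positivity, hcond.1⟩
      have h2 := (List.any_eq_false.mp hna) _ hmem
      exfalso
      apply h2
      rw [show c = ((c.toNat : Nat) : Int) by omega, pvGet_cast]
      simp only [pvGroundSign, beq_iff_eq]
      rw [show c.toNat = c' by omega]
      exact hx
  · exact Iff.rfl

theorem pvX_clearRow (C : Int) (M : List (List String)) (r : Int) (hr : 0 ≤ r)
    (hna : (PySem.List.pyRange 0 C 1).any (fun c => pvGet M r c == pvGroundSign) = false) :
    ∀ r' c' : Nat, (pvG (pvClearRow C M r) r' c' = "X") ↔ (pvG M r' c' = "X") := by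
  intro r' c'
  rw [pvG_clearRow C M r hr r' c']
  split_ifs with hcond
  · constructor
    · intro hx; exact absurd hx (by decide)
    · intro hx
      have hmem : (↑c' : Int) ∈ PySem.List.pyRange 0 C 1 :=
        PySem.List.mem_pyRange_one.mpr ⟨by positivity, hcond.1⟩
      have h2 := (List.any_eq_false.mp hna) _ hmem
      exfalso
      apply h2
      rw [show r = ((r.toNat : Nat) : Int) by omega, pvGet_cast]
      simp only [pvGroundSign, beq_iff_eq]
      rw [show r.toNat = r' by omega]
      exact hx
  · exact Iff.rfl

theorem pvColLoop_char (R C : Int) (M0 : List (List String)) :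
    ∀ (l : List Int) (M : List (List String)),
      (∀ c ∈ l, 0 ≤ c) →
      (∀ r c : Nat, (pvG M r c = "X") ↔ (pvG M0 r c = "X")) →
      pvShape (pvColLoop R C M l) = pvShape M ∧
      (∀ r c : Nat, (pvG (pvColLoop R C M l) r c = "X") ↔ (pvG M0 r c = "X")) ∧
      (∀ r c : Nat, pvG (pvColLoop R C M l) r c =
        if (↑c ∈ l.takeWhile (fun d => !((PySem.List.pyRange 0 R 1).any (fun rr => pvGet M0 rr d == pvGroundSign)))
            ∧ (↑r : Int) < R ∧ r < M.length ∧ c < (M.getD r []).length)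
        then "" else pvG M r c) := by
  intro l
  induction l with
  | nil =>
    intro M hl hX
    refine ⟨rfl, hX, ?_⟩
    intro r c
    simp [pvColLoop]
  | cons c t ih =>
    intro M hl hX
    have hc0 : 0 ≤ c := hl c List.mem_cons_self
    have hany := pv_any_congr R hX c hc0
    unfold pvColLoop
    by_cases hb : (PySem.List.pyRange 0 R 1).any (fun r => pvGet M r c == pvGroundSign) = true
    · rw [if_pos hb]
      have hb0 : (PySem.List.pyRange 0 R 1).any (fun rr => pvGet M0 rr c == pvGroundSign) = true := by
        rw [← hany]; exact hb
      refine ⟨rfl, hX, ?_⟩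
      intro r c'
      rw [List.takeWhile_cons_of_neg (by simp [hb0])]
      simp
    · rw [if_neg hb]
      have hbf : (PySem.List.pyRange 0 R 1).any (fun r => pvGet M r c == pvGroundSign) = false :=
        Bool.eq_false_iff.mpr hb
      have hb0 : (PySem.List.pyRange 0 R 1).any (fun rr => pvGet M0 rr c == pvGroundSign) = false := by
        rw [← hany]; exact hbf
      have hX1 := pvX_clearCol R M c hc0 hbf
      obtain ⟨ih1, ih2, ih3⟩ := ih (pvClearCol R M c)
        (fun d hd => hl d (List.mem_cons.mpr (Or.inr hd)))
        (fun r' c' => (hX1 r' c').trans (hX r' c'))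
      have hsh := pvShape_clearCol R M c
      refine ⟨ih1.trans hsh, ih2, ?_⟩
      intro r c'
      rw [ih3 r c', pvShape_length hsh, pvShape_row hsh, pvG_clearCol R M c hc0 r c',
          List.takeWhile_cons_of_pos (by simp [hb0])]
      by_cases hbounds : r < M.length ∧ c' < (M.getD r []).length
      · by_cases hR : (↑r : Int) < R
        · by_cases h1 : (↑c' : Int) ∈ t.takeWhile (fun d => !((PySem.List.pyRange 0 R 1).any (fun rr => pvGet M0 rr d == pvGroundSign)))
          · rw [if_pos ⟨h1, hR, hbounds.1, hbounds.2⟩,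
                if_pos ⟨List.mem_cons.mpr (Or.inr h1), hR, hbounds.1, hbounds.2⟩]
          · by_cases h2 : (↑c' : Int) = c
            · rw [if_neg (by tauto), if_pos ⟨hR, h2, hbounds.1, hbounds.2⟩,
                  if_pos ⟨List.mem_cons.mpr (Or.inl h2), hR, hbounds.1, hbounds.2⟩]
            · rw [if_neg (by tauto), if_neg (by tauto),
                  if_neg (by rintro ⟨hm, -, -⟩; rcases List.mem_cons.mp hm with h | h <;> tauto)]
        · rw [if_neg (by tauto), if_neg (by tauto), if_neg (by tauto)]
      · rw [if_neg (by tauto), if_neg (by tauto), if_neg (by tauto)]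

theorem pvRowLoop_char (R C : Int) (M0 : List (List String)) :
    ∀ (l : List Int) (M : List (List String)),
      (∀ r ∈ l, 0 ≤ r) →
      (∀ r c : Nat, (pvG M r c = "X") ↔ (pvG M0 r c = "X")) →
      pvShape (pvRowLoop R C M l) = pvShape M ∧
      (∀ r c : Nat, (pvG (pvRowLoop R C M l) r c = "X") ↔ (pvG M0 r c = "X")) ∧
      (∀ r c : Nat, pvG (pvRowLoop R C M l) r c =
        if (↑r ∈ l.takeWhile (fun d => !((PySem.List.pyRange 0 C 1).any (fun cc => pvGet M0 d cc == pvGroundSign)))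
            ∧ (↑c : Int) < C ∧ r < M.length ∧ c < (M.getD r []).length)
        then "" else pvG M r c) := by
  intro l
  induction l with
  | nil =>
    intro M hl hX
    refine ⟨rfl, hX, ?_⟩
    intro r c
    simp [pvRowLoop]
  | cons r0 t ih =>
    intro M hl hX
    have hr0 : 0 ≤ r0 := hl r0 List.mem_cons_self
    have hany : ((PySem.List.pyRange 0 C 1).any (fun cc => pvGet M r0 cc == pvGroundSign)) =
        ((PySem.List.pyRange 0 C 1).any (fun cc => pvGet M0 r0 cc == pvGroundSign)) := by
      apply PySem.List.any_congr_mem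
      intro x hx
      have hx0 : 0 ≤ x := (PySem.List.mem_pyRange_one.mp hx).1
      obtain ⟨cn, rfl⟩ : ∃ n : Nat, x = ↑n := ⟨x.toNat, by omega⟩
      obtain ⟨rn, rfl⟩ : ∃ n : Nat, r0 = ↑n := ⟨r0.toNat, by omega⟩
      rw [pvGet_cast, pvGet_cast, Bool.eq_iff_iff]
      simp only [pvGroundSign, beq_iff_eq]
      exact hX rn cn
    unfold pvRowLoop
    by_cases hb : (PySem.List.pyRange 0 C 1).any (fun cc => pvGet M r0 cc == pvGroundSign) = true
    · rw [if_pos hb]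
      have hb0 : (PySem.List.pyRange 0 C 1).any (fun cc => pvGet M0 r0 cc == pvGroundSign) = true := by
        rw [← hany]; exact hb
      refine ⟨rfl, hX, ?_⟩
      intro r c'
      rw [List.takeWhile_cons_of_neg (by simp [hb0])]
      simp
    · rw [if_neg hb]
      have hbf : (PySem.List.pyRange 0 C 1).any (fun cc => pvGet M r0 cc == pvGroundSign) = false :=
        Bool.eq_false_iff.mpr hb
      have hb0 : (PySem.List.pyRange 0 C 1).any (fun cc => pvGet M0 r0 cc == pvGroundSign) = false := by
        rw [← hany]; exact hbf
      have hX1 := pvX_clearRow C M r0 hr0 hbf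
      obtain ⟨ih1, ih2, ih3⟩ := ih (pvClearRow C M r0)
        (fun d hd => hl d (List.mem_cons.mpr (Or.inr hd)))
        (fun r' c' => (hX1 r' c').trans (hX r' c'))
      have hsh := pvShape_clearRow C M r0
      refine ⟨ih1.trans hsh, ih2, ?_⟩
      intro r c'
      rw [ih3 r c', pvShape_length hsh, pvShape_row hsh, pvG_clearRow C M r0 hr0 r c',
          List.takeWhile_cons_of_pos (by simp [hb0])]
      by_cases hbounds : r < M.length ∧ c' < (M.getD r []).length
      · by_cases hC : (↑c' : Int) < C
        · by_cases h1 : (↑r : Int) ∈ t.takeWhile (fun d => !((PySem.List.pyRange 0 C 1).any (fun cc => pvGet M0 d cc == pvGroundSign)))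
          · rw [if_pos ⟨h1, hC, hbounds.1, hbounds.2⟩,
                if_pos ⟨List.mem_cons.mpr (Or.inr h1), hC, hbounds.1, hbounds.2⟩]
          · by_cases h2 : (↑r : Int) = r0
            · rw [if_neg (by tauto), if_pos ⟨hC, h2, hbounds.1, hbounds.2⟩,
                  if_pos ⟨List.mem_cons.mpr (Or.inl h2), hC, hbounds.1, hbounds.2⟩]
            · rw [if_neg (by tauto), if_neg (by tauto),
                  if_neg (by rintro ⟨hm, -, -⟩; rcases List.mem_cons.mp hm with h | h <;> tauto)]
        · rw [if_neg (by tauto), if_neg (by tauto), if_neg (by tauto)]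
      · rw [if_neg (by tauto), if_neg (by tauto), if_neg (by tauto)]

theorem pv_tw_asc (p : Int → Bool) (b : Int) :
    ∀ (n : Nat) (a x : Int), (b - a).toNat = n →
      (x ∈ (PySem.List.pyRange a b 1).takeWhile p ↔
        (a ≤ x ∧ x < b ∧ ∀ d, a ≤ d → d ≤ x → p d = true)) := by
  intro n
  induction n with
  | zero =>
    intro a x hn
    rw [PySem.List.pyRange_one_eq_nil (by omega)]
    simp only [List.takeWhile_nil, List.not_mem_nil, false_iff]
    rintro ⟨h1, h2, -⟩; omega
  | succ n ih =>
    intro a x hn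
    have hab : a < b := by omega
    rw [PySem.List.pyRange_one_cons hab]
    by_cases hpa : p a = true
    · rw [List.takeWhile_cons_of_pos hpa, List.mem_cons, ih (a+1) x (by omega)]
      constructor
      · rintro (h0 | ⟨h1, h2, h3⟩)
        · exact ⟨by omega, by omega, fun d hd1 hd2 => by rw [show d = a by omega]; exact hpa⟩
        · exact ⟨by omega, h2, fun d hd1 hd2 => by
            by_cases hda : d = a
            · rw [hda]; exact hpa
            · exact h3 d (by omega) hd2⟩
      · rintro ⟨h1, h2, h3⟩
        by_cases hxa : x = a
        · exact Or.inl hxa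
        · exact Or.inr ⟨by omega, h2, fun d hd1 hd2 => h3 d (by omega) hd2⟩
    · rw [List.takeWhile_cons_of_neg (by simpa using hpa)]
      simp only [List.not_mem_nil, false_iff]
      rintro ⟨h1, h2, h3⟩
      exact hpa (h3 a (le_refl _) h1)

theorem pv_tw_desc (p : Int → Bool) (b : Int) :
    ∀ (n : Nat) (a x : Int), (a - b).toNat = n →
      (x ∈ (PySem.List.pyRange a b (-1)).takeWhile p ↔
        (b < x ∧ x ≤ a ∧ ∀ d, x ≤ d → d ≤ a → p d = true)) := by
  intro n
  induction n with
  | zero =>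
    intro a x hn
    rw [PySem.List.pyRange_neg_one_eq_nil (by omega)]
    simp only [List.takeWhile_nil, List.not_mem_nil, false_iff]
    rintro ⟨h1, h2, -⟩; omega
  | succ n ih =>
    intro a x hn
    have hab : b < a := by omega
    rw [PySem.List.pyRange_neg_one_cons hab]
    by_cases hpa : p a = true
    · rw [List.takeWhile_cons_of_pos hpa, List.mem_cons, ih (a-1) x (by omega)]
      constructor
      · rintro (h0 | ⟨h1, h2, h3⟩)
        · exact ⟨by omega, by omega, fun d hd1 hd2 => by rw [show d = a by omega]; exact hpa⟩
        · exact ⟨h1, by omega, fun d hd1 hd2 => by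
            by_cases hda : d = a
            · rw [hda]; exact hpa
            · exact h3 d hd1 (by omega)⟩
      · rintro ⟨h1, h2, h3⟩
        by_cases hxa : x = a
        · exact Or.inl hxa
        · exact Or.inr ⟨h1, by omega, fun d hd1 hd2 => h3 d hd1 (by omega)⟩
    · rw [List.takeWhile_cons_of_neg (by simpa using hpa)]
      simp only [List.not_mem_nil, false_iff]
      rintro ⟨h1, h2, h3⟩
      exact hpa (h3 a h2 (le_refl _))

theorem eq_of_shape_pvG {M N : List (List String)} (hs : pvShape M = pvShape N)
    (h : ∀ r c : Nat, pvG M r c = pvG N r c) : M = N := by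
  apply List.ext_getElem (pvShape_length hs)
  intro i h1 h2
  apply List.ext_getElem
  · have := pvShape_row hs i
    rwa [List.getD_eq_getElem?_getD, List.getD_eq_getElem?_getD,
         List.getElem?_eq_getElem h1, List.getElem?_eq_getElem h2] at this
  · intro j j1 j2
    have := h i j
    unfold pvG at this
    rwa [List.getD_eq_getElem?_getD (l := M), List.getD_eq_getElem?_getD (l := N),
         List.getElem?_eq_getElem h1, List.getElem?_eq_getElem h2,
         Option.getD_some, Option.getD_some,
         List.getD_eq_getElem?_getD (l := M[i]), List.getD_eq_getElem?_getD (l := N[i]),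
         List.getElem?_eq_getElem j1, List.getElem?_eq_getElem j2,
         Option.getD_some, Option.getD_some] at this

theorem lt_pvMin_iff (l : List Int) (hne : l ≠ []) (x : Int) :
    (x < pvMin l) ↔ ∀ d ∈ l, x < d := by
  obtain ⟨a, t, rfl⟩ : ∃ a t, l = a :: t := by
    cases l with
    | nil => exact absurd rfl hne
    | cons a t => exact ⟨a, t, rfl⟩
  rw [show pvMin (a :: t) = t.foldl min a from rfl]
  constructor
  · intro h d hd
    rcases List.mem_cons.mp hd with h0 | hdt
    · rw [h0]; exact lt_of_lt_of_le h (PySem.List.foldl_min_le t a).1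
    · exact lt_of_lt_of_le h ((PySem.List.foldl_min_le t a).2 d hdt)
  · intro h
    rcases PySem.List.foldl_min_mem t a with he | he
    · rw [he]; exact h a List.mem_cons_self
    · exact h _ (List.mem_cons.mpr (Or.inr he))

theorem pvMax_lt_iff (l : List Int) (hne : l ≠ []) (x : Int) :
    (pvMax l < x) ↔ ∀ d ∈ l, d < x := by
  obtain ⟨a, t, rfl⟩ : ∃ a t, l = a :: t := by
    cases l with
    | nil => exact absurd rfl hne
    | cons a t => exact ⟨a, t, rfl⟩
  rw [show pvMax (a :: t) = t.foldl max a from rfl]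
  constructor
  · intro h d hd
    rcases List.mem_cons.mp hd with h0 | hdt
    · rw [h0]; exact lt_of_le_of_lt (PySem.List.le_foldl_max t a).1 h
    · exact lt_of_le_of_lt ((PySem.List.le_foldl_max t a).2 d hdt) h
  · intro h
    rcases PySem.List.foldl_max_mem t a with he | he
    · rw [he]; exact h a List.mem_cons_self
    · exact h _ (List.mem_cons.mpr (Or.inr he))

theorem pvCnt_eq (R C : Int) (arr : List (List String)) (s : String) (r c : Int) :
    pvCnt R C arr s r c =
      pvB2I (pvIsSea R C arr s (r+1) c) + pvB2I (pvIsSea R C arr s (r-1) c) +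
      pvB2I (pvIsSea R C arr s r (c+1)) + pvB2I (pvIsSea R C arr s r (c-1)) := by
  unfold pvCnt pvIsSea pvB2I
  rw [show PySem.List.pyRange 0 4 1 = [0, 1, 2, 3] from by decide]
  simp only [List.foldl_cons, List.foldl_nil]
  rw [show PySem.List.pyGetD [(1:Int), -1, 0, 0] 0 0 = 1 from by decide,
      show PySem.List.pyGetD [(0:Int), 0, 1, -1] 0 0 = 0 from by decide,
      show PySem.List.pyGetD [(1:Int), -1, 0, 0] 1 0 = -1 from by decide,
      show PySem.List.pyGetD [(0:Int), 0, 1, -1] 1 0 = 0 from by decide,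
      show PySem.List.pyGetD [(1:Int), -1, 0, 0] 2 0 = 0 from by decide,
      show PySem.List.pyGetD [(0:Int), 0, 1, -1] 2 0 = 1 from by decide,
      show PySem.List.pyGetD [(1:Int), -1, 0, 0] 3 0 = 0 from by decide,
      show PySem.List.pyGetD [(0:Int), 0, 1, -1] 3 0 = -1 from by decide]
  simp only [add_zero, show ∀ x : Int, x + -1 = x - 1 from fun x => by ring]
  split_ifs <;> norm_num

theorem mem_pvLs (R C : Int) (arr : List (List String)) (s : String) (a b : Int) :
    ((a, b) ∈ pvLs R C arr s) ↔
      (0 ≤ a ∧ a < R ∧ 0 ≤ b ∧ b < C ∧ ¬((pvGet arr a b == s) = true) ∧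
       3 ≤ pvCnt R C arr s a b) := by
  unfold pvLs
  have hinner : ∀ (acc : List (Int × Int)) (r : Int),
      List.foldl (fun ls c =>
        if pvGet arr r c == s then ls
        else if 3 ≤ pvCnt R C arr s r c then ls ++ [(r, c)] else ls) acc
        (PySem.List.pyRange 0 C 1) =
      acc ++ ((PySem.List.pyRange 0 C 1).filter
        (fun c => !(pvGet arr r c == s) && decide (3 ≤ pvCnt R C arr s r c))).map
        (fun c => (r, c)) := by
    intro acc r
    rw [PySem.List.foldl_congr_mem (PySem.List.pyRange 0 C 1) _
        (fun ls c => if (!(pvGet arr r c == s) && decide (3 ≤ pvCnt R C arr s r c)) = true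
                     then ls ++ [(r, c)] else ls) acc ?_]
    · exact PySem.List.foldl_append_if _ _ _ _
    · intro acc' x _
      by_cases h1 : (pvGet arr r x == s) = true
      · simp [h1]
      · by_cases h2 : 3 ≤ pvCnt R C arr s r x <;> simp [h1, h2]
  rw [PySem.List.foldl_congr_mem (PySem.List.pyRange 0 R 1) _
      (fun ls r => ls ++ ((PySem.List.pyRange 0 C 1).filter
        (fun c => !(pvGet arr r c == s) && decide (3 ≤ pvCnt R C arr s r c))).map
        (fun c => (r, c))) [] (fun acc x _ => hinner acc x)]
  rw [PySem.List.foldl_append_eq_flatMap]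
  simp only [List.nil_append, List.mem_flatMap, List.mem_map, List.mem_filter,
             PySem.List.mem_pyRange_one]
  constructor
  · rintro ⟨r, ⟨hr0, hrR⟩, c, ⟨⟨hc0, hcC⟩, hf⟩, heq⟩
    have h1 : r = a := congrArg Prod.fst heq
    have h2 : c = b := congrArg Prod.snd heq
    subst h1; subst h2
    simp only [Bool.and_eq_true, Bool.not_eq_true', decide_eq_true_eq] at hf
    exact ⟨hr0, hrR, hc0, hcC, by simp [hf.1], hf.2⟩
  · rintro ⟨h1, h2, h3, h4, h5, h6⟩
    exact ⟨a, ⟨h1, h2⟩, b, ⟨⟨h3, h4⟩, by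
      simp only [Bool.and_eq_true, Bool.not_eq_true', decide_eq_true_eq]
      exact ⟨by simpa using h5, h6⟩⟩, rfl⟩

theorem pv_foldl_flatMap {α β γ : Type} (g : α → List β) (f : γ → β → γ) (l : List α) (b : γ) :
    ((l.flatMap g).foldl f b) = l.foldl (fun x a => (g a).foldl f x) b := by
  induction l generalizing b <;> simp [List.foldl_append, *]

theorem mem_pairs (R C : Int) (p : Int → Int → Bool) (a b : Int) :
    ((a, b) ∈ (PySem.List.pyRange 0 R 1).flatMap (fun r =>
      ((PySem.List.pyRange 0 C 1).filter (p r)).map (fun c => (r, c)))) ↔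
    (0 ≤ a ∧ a < R ∧ 0 ≤ b ∧ b < C ∧ p a b = true) := by
  simp only [List.mem_flatMap, List.mem_map, List.mem_filter, PySem.List.mem_pyRange_one]
  constructor
  · rintro ⟨r, ⟨h1, h2⟩, c, ⟨⟨h3, h4⟩, h5⟩, heq⟩
    have ha : r = a := congrArg Prod.fst heq
    have hb2 : c = b := congrArg Prod.snd heq
    subst ha; subst hb2
    exact ⟨h1, h2, h3, h4, h5⟩
  · rintro ⟨h1, h2, h3, h4, h5⟩
    exact ⟨a, ⟨h1, h2⟩, b, ⟨⟨h3, h4⟩, h5⟩, rfl⟩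

theorem mem_pvIsolated (R C : Int) (arr : List (List String)) (s : String) (a b : Int) :
    ((a, b) ∈ pvIsolated R C arr s) ↔
      (0 ≤ a ∧ a < R ∧ 0 ≤ b ∧ b < C ∧ ¬((pvGet arr a b == s) = true) ∧
       3 ≤ pvCnt R C arr s a b) := by
  unfold pvIsolated
  rw [mem_pairs, pvCnt_eq]
  constructor
  · rintro ⟨h1, h2, h3, h4, h5⟩
    simp only [Bool.and_eq_true, Bool.not_eq_true', decide_eq_true_eq] at h5
    exact ⟨h1, h2, h3, h4, by simp [h5.1], h5.2⟩
  · rintro ⟨h1, h2, h3, h4, h5, h6⟩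
    refine ⟨h1, h2, h3, h4, ?_⟩
    simp only [Bool.and_eq_true, Bool.not_eq_true', decide_eq_true_eq]
    exact ⟨by simpa using h5, h6⟩

theorem mark_eq (R C : Int) (arr : List (List String)) (s : String) :
    (pvLs R C arr s).reverse.foldl (fun a p => pvSet a p.1 p.2 s) arr = pvMarkB R C arr s := by
  unfold pvMarkB
  have hnn1 : ∀ p ∈ (pvLs R C arr s).reverse, 0 ≤ p.1 ∧ 0 ≤ p.2 := by
    intro p hp
    obtain ⟨x, y⟩ := p
    have := (mem_pvLs R C arr s x y).mp (List.mem_reverse.mp hp)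
    exact ⟨this.1, this.2.2.1⟩
  have hnn2 : ∀ p ∈ pvIsolated R C arr s, 0 ≤ p.1 ∧ 0 ≤ p.2 := by
    intro p hp
    obtain ⟨x, y⟩ := p
    have := (mem_pvIsolated R C arr s x y).mp hp
    exact ⟨this.1, this.2.2.1⟩
  apply eq_of_shape_pvG
  · rw [pvShape_foldl_set, pvShape_foldl_set]
  · intro r c
    rw [pvG_foldl_set s ((pvLs R C arr s).reverse) arr hnn1 r c,
        pvG_foldl_set s (pvIsolated R C arr s) arr hnn2 r c]
    refine if_congr (and_congr ?_ Iff.rfl) rfl rfl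
    rw [List.mem_reverse, mem_pvLs, mem_pvIsolated]

theorem mem_pvLand (R C : Int) (M : List (List String)) (a b : Int) :
    ((a, b) ∈ pvLand R C M) ↔
      (0 ≤ a ∧ a < R ∧ 0 ≤ b ∧ b < C ∧ pvG M a.toNat b.toNat = "X") := by
  unfold pvLand
  rw [mem_pairs]
  constructor
  · rintro ⟨h1, h2, h3, h4, h5⟩
    refine ⟨h1, h2, h3, h4, ?_⟩
    rw [show a = ((a.toNat : Nat) : Int) by omega, show b = ((b.toNat : Nat) : Int) by omega,
        pvGet_cast] at h5
    simpa [pvGround] using h5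
  · rintro ⟨h1, h2, h3, h4, h5⟩
    refine ⟨h1, h2, h3, h4, ?_⟩
    rw [show a = ((a.toNat : Nat) : Int) by omega, show b = ((b.toNat : Nat) : Int) by omega,
        pvGet_cast]
    simpa [pvGround] using h5

theorem pvG_clearFold (R C : Int) (cond : Int → Int → Prop) [instD : ∀ r c : Int, Decidable (cond r c)]
    (M : List (List String)) :
    pvShape ((PySem.List.pyRange 0 R 1).foldl (fun a r =>
        (PySem.List.pyRange 0 C 1).foldl (fun a c => if cond r c then pvSet a r c "" else a) a) M)
      = pvShape M ∧
    (∀ r c : Nat, pvG ((PySem.List.pyRange 0 R 1).foldl (fun a r =>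
        (PySem.List.pyRange 0 C 1).foldl (fun a c => if cond r c then pvSet a r c "" else a) a) M) r c =
      if ((↑r : Int) < R ∧ (↑c : Int) < C ∧ cond ↑r ↑c ∧ r < M.length ∧ c < (M.getD r []).length)
      then "" else pvG M r c) := by
  have hfun : (fun (a : List (List String)) (r : Int) =>
      (PySem.List.pyRange 0 C 1).foldl (fun a c => if cond r c then pvSet a r c "" else a) a)
      = (fun (a : List (List String)) (r : Int) =>
        ((((PySem.List.pyRange 0 C 1).filter (fun c => decide (cond r c))).map
          (fun c => ((r, c) : Int × Int))).foldl (fun a q => pvSet a q.1 q.2 "") a)) := by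
    funext a r
    rw [List.foldl_map, List.foldl_filter]
    have : (fun (x : List (List String)) (y : Int) =>
        if decide (cond r y) = true then pvSet x r y "" else x)
        = (fun (x : List (List String)) (y : Int) => if cond r y then pvSet x r y "" else x) := by
      funext x y
      by_cases h : cond r y <;> simp [h]
    rw [this]
  rw [hfun, ← pv_foldl_flatMap (fun r => ((PySem.List.pyRange 0 C 1).filter
        (fun c => decide (cond r c))).map (fun c => ((r, c) : Int × Int)))
      (fun a q => pvSet a q.1 q.2 "") (PySem.List.pyRange 0 R 1) M]
  have hnn : ∀ q ∈ (PySem.List.pyRange 0 R 1).flatMap (fun r =>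
      ((PySem.List.pyRange 0 C 1).filter (fun c => decide (cond r c))).map
        (fun c => ((r, c) : Int × Int))), 0 ≤ q.1 ∧ 0 ≤ q.2 := by
    intro q hq
    obtain ⟨x, y⟩ := q
    have := (mem_pairs R C (fun r c => decide (cond r c)) x y).mp hq
    exact ⟨this.1, this.2.2.1⟩
  refine ⟨pvShape_foldl_set _ _ M, ?_⟩
  intro r c
  rw [pvG_foldl_set _ _ M hnn r c]
  refine if_congr ?_ rfl rfl
  rw [mem_pairs R C (fun r c => decide (cond r c))]
  simp only [decide_eq_true_eq]
  constructor
  · rintro ⟨⟨h1, h2, h3, h4, h5⟩, h6, h7⟩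
    exact ⟨h2, h4, h5, h6, h7⟩
  · rintro ⟨h2, h4, h5, h6, h7⟩
    exact ⟨⟨by positivity, h2, by positivity, h4, h5⟩, h6, h7⟩

theorem pv_anyCol_iff (R : Int) (M : List (List String)) (d : Int) (hd : 0 ≤ d) :
    (((PySem.List.pyRange 0 R 1).any (fun rr => pvGet M rr d == pvGroundSign)) = true) ↔
      ∃ rn : Nat, (↑rn : Int) < R ∧ pvG M rn d.toNat = "X" := by
  rw [List.any_eq_true]
  constructor
  · rintro ⟨rr, hrr, hbe⟩
    have h0 := PySem.List.mem_pyRange_one.mp hrr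
    refine ⟨rr.toNat, by omega, ?_⟩
    rw [show rr = ((rr.toNat : Nat) : Int) by omega, show d = ((d.toNat : Nat) : Int) by omega,
        pvGet_cast] at hbe
    simpa [pvGroundSign] using hbe
  · rintro ⟨rn, hrn, hX⟩
    refine ⟨↑rn, PySem.List.mem_pyRange_one.mpr ⟨by positivity, hrn⟩, ?_⟩
    rw [show d = ((d.toNat : Nat) : Int) by omega, pvGet_cast]
    simpa [pvGroundSign] using hX

theorem pv_anyRow_iff (C : Int) (M : List (List String)) (d : Int) (hd : 0 ≤ d) :
    (((PySem.List.pyRange 0 C 1).any (fun cc => pvGet M d cc == pvGroundSign)) = true) ↔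
      ∃ cn : Nat, (↑cn : Int) < C ∧ pvG M d.toNat cn = "X" := by
  rw [List.any_eq_true]
  constructor
  · rintro ⟨cc, hcc, hbe⟩
    have h0 := PySem.List.mem_pyRange_one.mp hcc
    refine ⟨cc.toNat, by omega, ?_⟩
    rw [show cc = ((cc.toNat : Nat) : Int) by omega, show d = ((d.toNat : Nat) : Int) by omega,
        pvGet_cast] at hbe
    simpa [pvGroundSign] using hbe
  · rintro ⟨cn, hcn, hX⟩
    refine ⟨↑cn, PySem.List.mem_pyRange_one.mpr ⟨by positivity, hcn⟩, ?_⟩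
    rw [show d = ((d.toNat : Nat) : Int) by omega, pvGet_cast]
    simpa [pvGroundSign] using hX

theorem tw_asc_iff_lt_min (ANY : Int → Bool) (L : List Int) (Cb : Int)
    (hL : L ≠ []) (hbound : ∀ d ∈ L, 0 ≤ d ∧ d < Cb)
    (hlink : ∀ d : Int, 0 ≤ d → d < Cb → (ANY d = true ↔ d ∈ L))
    (x : Int) (hx0 : 0 ≤ x) (hxC : x < Cb) :
    (x ∈ (PySem.List.pyRange 0 Cb 1).takeWhile (fun d => !ANY d) ↔ x < pvMin L) := by
  rw [pv_tw_asc _ Cb (Cb - 0).toNat 0 x rfl, lt_pvMin_iff L hL x]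
  constructor
  · rintro ⟨-, -, h3⟩ d hd
    by_contra hcon
    push Not at hcon
    have hd0 := hbound d hd
    have h4 := h3 d hd0.1 (by omega)
    rw [Bool.not_eq_eq_eq_not, Bool.not_true] at h4
    exact absurd ((hlink d hd0.1 hd0.2).mpr hd) (by rw [h4]; exact Bool.false_ne_true)
  · intro h
    refine ⟨hx0, hxC, fun d hd1 hd2 => ?_⟩
    have hf : ANY d = false := by
      by_contra hcon
      have hdL := (hlink d hd1 (by omega)).mp (Bool.of_not_eq_false hcon)
      have := h d hdL
      omega
    rw [hf]; rfl

theorem tw_desc_iff_max_lt (ANY : Int → Bool) (L : List Int) (Cb : Int)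
    (hL : L ≠ []) (hbound : ∀ d ∈ L, 0 ≤ d ∧ d < Cb)
    (hlink : ∀ d : Int, 0 ≤ d → d < Cb → (ANY d = true ↔ d ∈ L))
    (x : Int) (hx0 : 0 ≤ x) (hxC : x < Cb) :
    (x ∈ (PySem.List.pyRange (Cb - 1) (-1) (-1)).takeWhile (fun d => !ANY d) ↔ pvMax L < x) := by
  rw [pv_tw_desc _ (-1) ((Cb - 1) - (-1)).toNat (Cb - 1) x rfl, pvMax_lt_iff L hL x]
  constructor
  · rintro ⟨-, -, h3⟩ d hd
    by_contra hcon
    push Not at hcon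
    have hd0 := hbound d hd
    have h4 := h3 d (by omega) (by omega)
    rw [Bool.not_eq_eq_eq_not, Bool.not_true] at h4
    exact absurd ((hlink d hd0.1 hd0.2).mpr hd) (by rw [h4]; exact Bool.false_ne_true)
  · intro h
    refine ⟨by omega, by omega, fun d hd1 hd2 => ?_⟩
    have hf : ANY d = false := by
      by_contra hcon
      have hdL := (hlink d (by omega) (by omega)).mp (Bool.of_not_eq_false hcon)
      have := h d hdL
      omega
    rw [hf]; rfl

theorem tw_asc_full (ANY : Int → Bool) (Cb : Int)
    (hempty : ∀ d : Int, 0 ≤ d → d < Cb → ANY d = false)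
    (x : Int) (hx0 : 0 ≤ x) (hxC : x < Cb) :
    x ∈ (PySem.List.pyRange 0 Cb 1).takeWhile (fun d => !ANY d) := by
  rw [pv_tw_asc _ Cb (Cb - 0).toNat 0 x rfl]
  exact ⟨hx0, hxC, fun d hd1 hd2 => by rw [hempty d hd1 (by omega)]; rfl⟩

theorem pv_ite_or (p q : Prop) [Decidable p] [Decidable q] (x : String) :
    (if p then "" else if q then "" else x) = if p ∨ q then "" else x := by
  split_ifs <;> tauto

theorem pv_main (R C : Int) (arr : List (List String)) (g s : String) :
    solution R C arr g s = solution_alt R C arr g s := by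
  unfold solution solution_alt
  rw [mark_eq R C arr s]
  set M := pvMarkB R C arr s with hM
  set land := pvLand R C M with hland
  have hCA : ∀ N, pvClearArrCol R C N true = pvColLoop R C N (PySem.List.pyRange 0 C 1) :=
    fun N => by unfold pvClearArrCol; rw [if_pos rfl]
  have hCD : ∀ N, pvClearArrCol R C N false = pvColLoop R C N (PySem.List.pyRange (C-1) (-1) (-1)) :=
    fun N => by unfold pvClearArrCol; rw [if_neg (by simp)]
  have hRA : ∀ N, pvClearArrRow R C N true = pvRowLoop R C N (PySem.List.pyRange 0 R 1) :=
    fun N => by unfold pvClearArrRow; rw [if_pos rfl]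
  have hRD : ∀ N, pvClearArrRow R C N false = pvRowLoop R C N (PySem.List.pyRange (R-1) (-1) (-1)) :=
    fun N => by unfold pvClearArrRow; rw [if_neg (by simp)]
  rw [hCA, hCD, hRA, hRD]
  obtain ⟨s1, x1, g1⟩ := pvColLoop_char R C M (PySem.List.pyRange 0 C 1) M
    (fun d hd => (PySem.List.mem_pyRange_one.mp hd).1) (fun r c => Iff.rfl)
  obtain ⟨s2, x2, g2⟩ := pvColLoop_char R C M (PySem.List.pyRange (C-1) (-1) (-1))
    (pvColLoop R C M (PySem.List.pyRange 0 C 1))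
    (fun d hd => by have := PySem.List.mem_pyRange_neg_one.mp hd; omega) x1
  obtain ⟨s3, x3, g3⟩ := pvRowLoop_char R C M (PySem.List.pyRange 0 R 1)
    (pvColLoop R C (pvColLoop R C M (PySem.List.pyRange 0 C 1)) (PySem.List.pyRange (C-1) (-1) (-1)))
    (fun d hd => (PySem.List.mem_pyRange_one.mp hd).1) x2
  obtain ⟨s4, x4, g4⟩ := pvRowLoop_char R C M (PySem.List.pyRange (R-1) (-1) (-1))
    (pvRowLoop R C (pvColLoop R C (pvColLoop R C M (PySem.List.pyRange 0 C 1)) (PySem.List.pyRange (C-1) (-1) (-1))) (PySem.List.pyRange 0 R 1))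
    (fun d hd => by have := PySem.List.mem_pyRange_neg_one.mp hd; omega) x3
  have sh1 := s1
  have sh2 := s2.trans sh1
  have sh3 := s3.trans sh2
  have sh4 := s4.trans sh3
  obtain ⟨shB, gB⟩ := pvG_clearFold R C (fun r c =>
      land = [] ∨ ¬(pvMin (land.map Prod.fst) ≤ r ∧ r ≤ pvMax (land.map Prod.fst) ∧
                    pvMin (land.map Prod.snd) ≤ c ∧ c ≤ pvMax (land.map Prod.snd))) M
  apply eq_of_shape_pvG (sh4.trans shB.symm)
  intro r c
  rw [g4 r c, pvShape_length sh3, pvShape_row sh3, g3 r c, pvShape_length sh2, pvShape_row sh2,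
      g2 r c, pvShape_length sh1, pvShape_row sh1, g1 r c, gB r c]
  rw [pv_ite_or, pv_ite_or, pv_ite_or]
  by_cases hb : r < M.length ∧ c < (M.getD r []).length
  · refine if_congr ?_ rfl rfl
    by_cases hxs : land = []
    · -- no ground cell anywhere in [0,R)×[0,C): everything in range is cleared
      have hnoX : ∀ (rn cn : Nat), (↑rn : Int) < R → (↑cn : Int) < C → pvG M rn cn ≠ "X" := by
        intro rn cn h1 h2 hX
        have hmem : ((↑rn, ↑cn) : Int × Int) ∈ land :=
          (mem_pvLand R C M ↑rn ↑cn).mpr ⟨by positivity, h1, by positivity, h2, by simpa using hX⟩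
        rw [hxs] at hmem
        exact absurd hmem List.not_mem_nil
      have hacol : ∀ d : Int, 0 ≤ d → d < C →
          ((PySem.List.pyRange 0 R 1).any (fun rr => pvGet M rr d == pvGroundSign)) = false := by
        intro d h1 h2
        by_contra hcon
        rcases (pv_anyCol_iff R M d h1).mp (Bool.of_not_eq_false hcon) with ⟨rn, hrn, hX⟩
        exact hnoX rn d.toNat hrn (by omega) hX
      constructor
      · rintro (((⟨h, hc', -, -⟩ | ⟨h, hc', -, -⟩) | ⟨h, hr', -, -⟩) | ⟨h, hr', -, -⟩)
        · rw [pv_tw_desc _ (-1) ((R-1) - (-1)).toNat (R-1) ↑r rfl] at h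
          exact ⟨by omega, hc', Or.inl hxs, hb.1, hb.2⟩
        · rw [pv_tw_asc _ R (R - 0).toNat 0 ↑r rfl] at h
          exact ⟨by omega, hc', Or.inl hxs, hb.1, hb.2⟩
        · rw [pv_tw_desc _ (-1) ((C-1) - (-1)).toNat (C-1) ↑c rfl] at h
          exact ⟨hr', by omega, Or.inl hxs, hb.1, hb.2⟩
        · rw [pv_tw_asc _ C (C - 0).toNat 0 ↑c rfl] at h
          exact ⟨hr', by omega, Or.inl hxs, hb.1, hb.2⟩
      · rintro ⟨hrR, hcC, -, -, -⟩
        exact Or.inr ⟨tw_asc_full _ C hacol ↑c (by positivity) hcC, hrR, hb.1, hb.2⟩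
    · -- some ground cell exists: A's four peels clear exactly outside the bounding box
      have hrs : land.map Prod.fst ≠ [] := fun h => hxs (List.map_eq_nil_iff.mp h)
      have hcs : land.map Prod.snd ≠ [] := fun h => hxs (List.map_eq_nil_iff.mp h)
      have hrs_bound : ∀ d ∈ land.map Prod.fst, 0 ≤ d ∧ d < R := by
        intro d hd
        rcases List.mem_map.mp hd with ⟨p, hp, h0⟩
        obtain ⟨x, y⟩ := p
        obtain ⟨u1, u2, -, -, -⟩ := (mem_pvLand R C M x y).mp hp
        simp only at h0
        omega
      have hcs_bound : ∀ d ∈ land.map Prod.snd, 0 ≤ d ∧ d < C := by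
        intro d hd
        rcases List.mem_map.mp hd with ⟨p, hp, h0⟩
        obtain ⟨x, y⟩ := p
        obtain ⟨-, -, u3, u4, -⟩ := (mem_pvLand R C M x y).mp hp
        simp only at h0
        omega
      have hlink_col : ∀ d : Int, 0 ≤ d → d < C →
          (((PySem.List.pyRange 0 R 1).any (fun rr => pvGet M rr d == pvGroundSign)) = true ↔
            d ∈ land.map Prod.snd) := by
        intro d h1 h2
        rw [pv_anyCol_iff R M d h1]
        constructor
        · rintro ⟨rn, hrn, hX⟩
          refine List.mem_map.mpr ⟨((↑rn : Int), d), ?_, rfl⟩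
          exact (mem_pvLand R C M ↑rn d).mpr ⟨by positivity, hrn, h1, h2, by simpa using hX⟩
        · intro hd
          rcases List.mem_map.mp hd with ⟨p, hp, hpd⟩
          obtain ⟨x, y⟩ := p
          obtain ⟨u1, u2, u3, u4, u5⟩ := (mem_pvLand R C M x y).mp hp
          simp only at hpd
          refine ⟨x.toNat, by omega, ?_⟩
          rw [show d.toNat = y.toNat by omega]
          exact u5
      have hlink_row : ∀ d : Int, 0 ≤ d → d < R →
          (((PySem.List.pyRange 0 C 1).any (fun cc => pvGet M d cc == pvGroundSign)) = true ↔
            d ∈ land.map Prod.fst) := by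
        intro d h1 h2
        rw [pv_anyRow_iff C M d h1]
        constructor
        · rintro ⟨cn, hcn, hX⟩
          refine List.mem_map.mpr ⟨(d, (↑cn : Int)), ?_, rfl⟩
          exact (mem_pvLand R C M d ↑cn).mpr ⟨h1, h2, by positivity, hcn, by simpa using hX⟩
        · intro hd
          rcases List.mem_map.mp hd with ⟨p, hp, hpd⟩
          obtain ⟨x, y⟩ := p
          obtain ⟨u1, u2, u3, u4, u5⟩ := (mem_pvLand R C M x y).mp hp
          simp only at hpd
          refine ⟨y.toNat, by omega, ?_⟩
          rw [show d.toNat = x.toNat by omega]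
          exact u5
      by_cases hrR : (↑r : Int) < R
      · by_cases hcC : (↑c : Int) < C
        · have ca := tw_asc_iff_lt_min _ _ C hcs hcs_bound hlink_col ↑c (by positivity) hcC
          have cd := tw_desc_iff_max_lt _ _ C hcs hcs_bound hlink_col ↑c (by positivity) hcC
          have ra := tw_asc_iff_lt_min _ _ R hrs hrs_bound hlink_row ↑r (by positivity) hrR
          have rd := tw_desc_iff_max_lt _ _ R hrs hrs_bound hlink_row ↑r (by positivity) hrR
          constructor
          · rintro (((⟨h, -, -, -⟩ | ⟨h, -, -, -⟩) | ⟨h, -, -, -⟩) | ⟨h, -, -, -⟩)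
            · have := rd.mp h
              exact ⟨hrR, hcC, Or.inr (by omega), hb.1, hb.2⟩
            · have := ra.mp h
              exact ⟨hrR, hcC, Or.inr (by omega), hb.1, hb.2⟩
            · have := cd.mp h
              exact ⟨hrR, hcC, Or.inr (by omega), hb.1, hb.2⟩
            · have := ca.mp h
              exact ⟨hrR, hcC, Or.inr (by omega), hb.1, hb.2⟩
          · rintro ⟨-, -, hcond, -, -⟩
            rcases hcond with h | hbox
            · exact absurd h hxs
            · have h4 : pvMax (land.map Prod.fst) < ↑r ∨ ↑r < pvMin (land.map Prod.fst) ∨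
                  pvMax (land.map Prod.snd) < ↑c ∨ ↑c < pvMin (land.map Prod.snd) := by
                omega
              rcases h4 with h | h | h | h
              · exact Or.inl (Or.inl (Or.inl ⟨rd.mpr h, hcC, hb.1, hb.2⟩))
              · exact Or.inl (Or.inl (Or.inr ⟨ra.mpr h, hcC, hb.1, hb.2⟩))
              · exact Or.inl (Or.inr ⟨cd.mpr h, hrR, hb.1, hb.2⟩)
              · exact Or.inr ⟨ca.mpr h, hrR, hb.1, hb.2⟩
        · constructor
          · rintro (((⟨-, hc', -, -⟩ | ⟨-, hc', -, -⟩) | ⟨h, -, -, -⟩) | ⟨h, -, -, -⟩)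
            · exact absurd hc' hcC
            · exact absurd hc' hcC
            · rw [pv_tw_desc _ (-1) ((C-1) - (-1)).toNat (C-1) ↑c rfl] at h
              exact absurd (show (↑c : Int) < C by omega) hcC
            · rw [pv_tw_asc _ C (C - 0).toNat 0 ↑c rfl] at h
              exact absurd (show (↑c : Int) < C by omega) hcC
          · rintro ⟨-, hc', -, -, -⟩
            exact absurd hc' hcC
      · constructor
        · rintro (((⟨h, -, -, -⟩ | ⟨h, -, -, -⟩) | ⟨-, hr', -, -⟩) | ⟨-, hr', -, -⟩)
          · rw [pv_tw_desc _ (-1) ((R-1) - (-1)).toNat (R-1) ↑r rfl] at h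
            exact absurd (show (↑r : Int) < R by omega) hrR
          · rw [pv_tw_asc _ R (R - 0).toNat 0 ↑r rfl] at h
            exact absurd (show (↑r : Int) < R by omega) hrR
          · exact absurd hr' hrR
          · exact absurd hr' hrR
        · rintro ⟨hr', -, -, -, -⟩
          exact absurd hr' hrR
  · rw [if_neg (by tauto), if_neg (by tauto)]

-- ===== VERDICT (by name: the statement is the Claim_ definition above) =====
theorem solution_spec : Claim_equal_solution := by
  intro R C arr g s _ _
  unfold Spec_solution
  exact pv_main R C arr g s
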